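-- pv_equiv track=rewrite | github.com/Reezzcy/Project-Ticket-Bus | project/main.py | format_rupiah
-- ===== SOURCE A (Python) =====
-- def format_rupiah(value):
--     rupiah = str(value)
--
--     if len(rupiah) <= 3:
--         rupiah = f"Rp {rupiah}"
--         return rupiah
--
--     else:
--         tail= rupiah[-3:]
--         head = rupiah[:-3]
--         return format_rupiah(head) + "." + tail
-- ===== SOURCE B (Python) =====
-- def format_rupiah(value):
--     s = str(value)
--     groups = []
--     while len(s) > 3:
--         groups.append(s[-3:])
--         s = s[:-3]
--     groups.append(s)
--     return "Rp " + ".".join(reversed(groups))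
-- ===== Notes on version B (the rewrite author's own statement) =====
-- stated objective: simpler
-- what changed: Replaces the recursion on the shrinking string with a single iterative loop that peels three-character chunks off the right end and joins them with dots.
import Mathlib
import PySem

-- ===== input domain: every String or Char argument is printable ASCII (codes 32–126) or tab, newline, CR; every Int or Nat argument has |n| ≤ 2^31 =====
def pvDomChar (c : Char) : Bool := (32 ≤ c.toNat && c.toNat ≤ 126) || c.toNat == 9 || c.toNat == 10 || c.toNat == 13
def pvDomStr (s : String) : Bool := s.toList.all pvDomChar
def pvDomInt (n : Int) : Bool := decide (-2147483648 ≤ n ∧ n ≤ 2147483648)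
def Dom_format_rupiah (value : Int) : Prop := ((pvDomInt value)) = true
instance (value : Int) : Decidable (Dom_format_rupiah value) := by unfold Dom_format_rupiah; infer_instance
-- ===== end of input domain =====

-- B replaces A's recursion by one iterative right-to-left chunking loop plus a join (simpler decomposition).

-- ===== PORT A =====
-- A recurses with the head SUBSTRING; str(head) is that same string, so the recursion
-- is modelled as structural recursion on the list of characters.
-- rupiah[:-3] = take (len-3), rupiah[-3:] = drop (len-3): exact for len > 3.
def formatA (s : List Char) : List Char :=
  if s.length ≤ 3 then "Rp ".toList ++ s
  else formatA (s.take (s.length - 3)) ++ '.' :: s.drop (s.length - 3)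
termination_by s.length
decreasing_by simp; omega

def format_rupiah (value : Int) : String :=
  String.ofList (formatA (PySem.Int.toStr value).toList)

-- ===== PORT B =====
-- while len(s) > 3: peel the last 3 chars into the group list (consing builds the
-- left-to-right order directly, matching Source B's append-then-reverse).
def bChunks (s : List Char) (acc : List (List Char)) : List (List Char) :=
  if s.length > 3 then bChunks (s.take (s.length - 3)) (s.drop (s.length - 3) :: acc)
  else s :: acc
termination_by s.length
decreasing_by simp; omega

def format_rupiah_alt (value : Int) : String :=
  String.ofList ("Rp ".toList ++ List.intercalate ['.'] (bChunks (PySem.Int.toStr value).toList []))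

-- ===== PRECONDITION & SPEC =====
def Spec_format_rupiah (value : Int) (out : String) : Prop := out = format_rupiah_alt value
instance (value : Int) (out : String) : Decidable (Spec_format_rupiah value out) := by unfold Spec_format_rupiah; infer_instance

-- ===== CLAIM (what is proved, stated in full; the proofs are below) =====
def Claim_equal_format_rupiah : Prop := ∀ (value : Int), Dom_format_rupiah value → Spec_format_rupiah value (format_rupiah value)

-- ===== LEMMAS AND PROOFS =====

theorem bChunks_eq_pos (s : List Char) (acc : List (List Char)) (h : s.length > 3) :
    bChunks s acc = bChunks (s.take (s.length - 3)) (s.drop (s.length - 3) :: acc) := by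
  conv_lhs => rw [bChunks]
  rw [if_pos h]

theorem bChunks_eq_neg (s : List Char) (acc : List (List Char)) (h : ¬ s.length > 3) :
    bChunks s acc = s :: acc := by
  conv_lhs => rw [bChunks]
  rw [if_neg h]

theorem formatA_eq_pos (s : List Char) (h : ¬ s.length ≤ 3) :
    formatA s = formatA (s.take (s.length - 3)) ++ '.' :: s.drop (s.length - 3) := by
  conv_lhs => rw [formatA]
  rw [if_neg h]

theorem formatA_eq_neg (s : List Char) (h : s.length ≤ 3) :
    formatA s = "Rp ".toList ++ s := by
  conv_lhs => rw [formatA]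
  rw [if_pos h]

theorem bChunks_acc (n : Nat) (s : List Char) (hs : s.length ≤ n) (acc : List (List Char)) :
    bChunks s acc = bChunks s [] ++ acc := by
  induction n generalizing s acc with
  | zero =>
    rw [bChunks_eq_neg _ _ (by omega), bChunks_eq_neg _ _ (by omega)]
    simp
  | succ n ih =>
    by_cases h : s.length > 3
    · rw [bChunks_eq_pos _ _ h, bChunks_eq_pos _ _ h,
        ih _ (by simp; omega) _, ih _ (by simp; omega) [_]]
      simp
    · rw [bChunks_eq_neg _ _ h, bChunks_eq_neg _ _ h]
      simp

theorem bChunks_ne_nil (s : List Char) : bChunks s [] ≠ [] := by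
  by_cases h : s.length > 3
  · rw [bChunks_eq_pos _ _ h, bChunks_acc (s.take (s.length - 3)).length _ le_rfl]
    simp
  · rw [bChunks_eq_neg _ _ h]
    simp

theorem intercalate_concat (sep : List Char) (l : List (List Char)) (h : l ≠ []) (x : List Char) :
    List.intercalate sep (l ++ [x]) = List.intercalate sep l ++ sep ++ x := by
  induction l with
  | nil => exact absurd rfl h
  | cons a t ih =>
    cases t with
    | nil => simp [List.intercalate, List.intersperse]
    | cons b u =>
      have := ih (by simp)
      simp only [List.intercalate, List.cons_append, List.intersperse, List.flatten] at this ⊢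
      rw [this]
      simp

theorem formatA_eq_aux (n : Nat) (s : List Char) (hs : s.length ≤ n) :
    "Rp ".toList ++ List.intercalate ['.'] (bChunks s []) = formatA s := by
  induction n generalizing s with
  | zero =>
    rw [bChunks_eq_neg _ _ (by omega), formatA_eq_neg _ (by omega)]
    simp [List.intercalate]
  | succ n ih =>
    by_cases h : s.length > 3
    · rw [bChunks_eq_pos _ _ h, bChunks_acc (s.take (s.length - 3)).length _ le_rfl,
        formatA_eq_pos _ (by omega),
        intercalate_concat _ _ (bChunks_ne_nil _) _,
        ← ih _ (by simp; omega)]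
      simp
    · rw [bChunks_eq_neg _ _ h, formatA_eq_neg _ (by omega)]
      simp [List.intercalate]

theorem formatA_eq (s : List Char) :
    "Rp ".toList ++ List.intercalate ['.'] (bChunks s []) = formatA s :=
  formatA_eq_aux s.length s le_rfl

-- ===== VERDICT (by name: the statement is the Claim_ definition above) =====
theorem format_rupiah_spec : Claim_equal_format_rupiah := by
  intro value _
  unfold Spec_format_rupiah format_rupiah format_rupiah_alt
  rw [formatA_eq]
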